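-- pv_equiv track=rewrite | github.com/EnCue/sss-app | GeneralSS_Standalone.py | generateCArray
-- ===== SOURCE A (Python) =====
-- def generateCArray(MUS, n):
--     Maps = [""] * n
--     for P in range(1, (n+1)):
--         PMap = ""
--         for entry in MUS:
--             if P in entry:
--                 PMap += "0"
--             else:
--                 PMap += "1"
--         Maps.append(PMap)
--
--     return Maps
-- ===== SOURCE B (Python) =====
-- def generateCArray(MUS, n):
--     rows = [["1"] * len(MUS) for _ in range(n)]
--     for j, entry in enumerate(MUS):
--         for m in entry:
--             if 1 <= m <= n:
--                 rows[m - 1][j] = "0"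
--     return [""] * n + ["".join(r) for r in rows]
-- ===== Notes on version B (the rewrite author's own statement) =====
-- stated objective: faster
-- what changed: Instead of testing 'P in entry' for every position/entry pair (which rescans each entry n times), B pre-fills an n x len(MUS) grid of '1's and drives the computation from the members actually present: each in-range member m of entry j clears cell (m-1, j) to '0', and the rows are joined at the end.
import Mathlib
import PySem

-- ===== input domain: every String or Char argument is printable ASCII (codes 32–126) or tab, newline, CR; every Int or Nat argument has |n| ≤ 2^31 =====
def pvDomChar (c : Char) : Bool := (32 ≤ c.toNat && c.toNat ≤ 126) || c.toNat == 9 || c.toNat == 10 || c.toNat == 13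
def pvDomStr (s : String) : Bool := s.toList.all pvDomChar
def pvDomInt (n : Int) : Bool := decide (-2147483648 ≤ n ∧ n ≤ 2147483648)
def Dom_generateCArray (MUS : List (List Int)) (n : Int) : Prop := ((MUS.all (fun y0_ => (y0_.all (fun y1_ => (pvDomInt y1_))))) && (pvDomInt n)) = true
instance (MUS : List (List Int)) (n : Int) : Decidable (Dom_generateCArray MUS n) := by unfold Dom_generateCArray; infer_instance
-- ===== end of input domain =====

-- B replaces A's per-position membership scan by a pre-filled n×len(MUS) grid of "1"s that is
-- cleared to "0" by the members actually present in each entry (measured faster; fewer entry scans).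

-- ===== PORT A =====
def generateCArray (MUS : List (List Int)) (n : Int) : List String :=
  let Maps := PySem.List.pyRepeat [""] n
  (PySem.List.pyRange 1 (n+1) 1).foldl (fun Maps P =>
    Maps ++ [MUS.foldl (fun PMap entry =>
      if P ∈ entry then PMap ++ "0" else PMap ++ "1") ""]) Maps

-- ===== PORT B =====
def generateCArray_alt (MUS : List (List Int)) (n : Int) : List String :=
  let rows0 := (PySem.List.pyRange 0 n 1).map (fun _ => PySem.List.pyRepeat ["1"] (MUS.length : Int))
  let rows := (PySem.List.enumerate MUS 0).foldl (fun rows je =>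
    je.2.foldl (fun rows m =>
      if 1 ≤ m ∧ m ≤ n then
        PySem.List.pySetD rows (m-1) (PySem.List.pySetD (PySem.List.pyGetD rows (m-1) []) je.1 "0")
      else rows) rows) rows0
  PySem.List.pyRepeat [""] n ++ rows.map (fun r => PySem.Str.join "" r)

-- ===== PRECONDITION & SPEC =====
def Spec_generateCArray (MUS : List (List Int)) (n : Int) (out : List String) : Prop := out = generateCArray_alt MUS n
instance (MUS : List (List Int)) (n : Int) (out : List String) : Decidable (Spec_generateCArray MUS n out) := by unfold Spec_generateCArray; infer_instance

-- ===== CLAIM (what is proved, stated in full; the proofs are below) =====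
def Claim_equal_generateCArray : Prop := ∀ (MUS : List (List Int)) (n : Int), Dom_generateCArray MUS n → Spec_generateCArray MUS n (generateCArray MUS n)

-- ===== LEMMAS AND PROOFS =====

-- the common normal form both ports are reduced to
def pvRowStr (MUS : List (List Int)) (n : Int) (q : Int) : String :=
  PySem.Str.join "" (MUS.map (fun e => if q ∈ e ∧ q ≤ n then "0" else "1"))

theorem pvJoin_nil : PySem.Str.join "" ([] : List String) = "" := by
  apply String.toList_inj.mp; simp [PySem.Chars.join, List.intercalate]

theorem pvIntercalate_nil (l : List (List Char)) : ([] : List Char).intercalate l = l.flatten := by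
  induction l with
  | nil => rfl
  | cons x t ih => cases t <;> simp_all [List.intercalate]

theorem pvJoin_cons (x : String) (t : List String) :
    PySem.Str.join "" (x :: t) = x ++ PySem.Str.join "" t := by
  apply String.toList_inj.mp
  simp [PySem.Chars.join, pvIntercalate_nil]

theorem pvFoldl_append_str (f : List Int → String) (l : List (List Int)) (s : String) :
    l.foldl (fun acc e => acc ++ f e) s = s ++ PySem.Str.join "" (l.map f) := by
  induction l generalizing s with
  | nil => simp [pvJoin_nil]
  | cons e t ih => simp [ih, pvJoin_cons, String.append_assoc]

-- A reduced to the normal form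
theorem pvA_eq (MUS : List (List Int)) (n : Int) :
    generateCArray MUS n =
      PySem.List.pyRepeat [""] n ++
        (List.range n.toNat).map (fun p : Nat => pvRowStr MUS n ((p : Int) + 1)) := by
  unfold generateCArray
  rw [PySem.List.foldl_append_singleton_eq_map, PySem.List.pyRange_one]
  have hn : (n + 1 - 1).toNat = n.toNat := by omega
  rw [hn, List.map_map]
  congr 1
  apply List.map_congr_left
  intro p hp
  rw [List.mem_range] at hp
  have h1 : ((p : Int) + 1) ≤ n := by omega
  simp only [Function.comp]
  have hif : (fun PMap entry => if (1 : Int) + (p : Int) ∈ entry then PMap ++ "0" else PMap ++ "1") =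
      (fun (PMap : String) (entry : List Int) => PMap ++ if (1 : Int) + (p : Int) ∈ entry then "0" else "1") := by
    funext s e; split_ifs <;> rfl
  rw [hif, pvFoldl_append_str (fun entry => if (1 : Int) + (p : Int) ∈ entry then "0" else "1") MUS ""]
  have : ("" : String) ++ PySem.Str.join ""
      (MUS.map fun entry => if (1 : Int) + (p : Int) ∈ entry then "0" else "1") =
      PySem.Str.join "" (MUS.map fun entry => if (1 : Int) + (p : Int) ∈ entry then "0" else "1") := by
    apply String.toList_inj.mp; simp
  rw [this]
  unfold pvRowStr
  congr 1
  apply List.map_congr_left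
  intro e _
  have : (1 : Int) + (p : Int) = (p : Int) + 1 := by ring
  rw [this]
  by_cases hm : ((p : Int) + 1) ∈ e <;> simp [hm, h1]

-- the normalized grid-update step for one member, at column j
def pvStep (n : Int) (j : Nat) (rows : List (List String)) (m : Int) : List (List String) :=
  if 1 ≤ m ∧ m ≤ n then rows.set (m-1).toNat ((rows[(m-1).toNat]?.getD []).set j "0") else rows

theorem pvPort_step_eq (n : Int) (j : Int) (hj : 0 ≤ j) (rows : List (List String)) (m : Int) :
    (if 1 ≤ m ∧ m ≤ n then
        PySem.List.pySetD rows (m-1) (PySem.List.pySetD (PySem.List.pyGetD rows (m-1) []) j "0")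
      else rows) = pvStep n j.toNat rows m := by
  unfold pvStep
  by_cases h : 1 ≤ m ∧ m ≤ n
  · have h0 : (0:Int) ≤ m - 1 := by omega
    simp only [h]
    rw [PySem.List.pySetD_of_nonneg _ _ h0, PySem.List.pyGetD_of_nonneg _ _ h0,
        PySem.List.pySetD_of_nonneg _ _ hj]
    simp [List.getD]
  · simp [h]

-- effect of the inner member loop on row p
theorem pvInner_elem (n : Int) (e : List Int) (j : Nat) (rows : List (List String)) (p : Nat) :
    (e.foldl (pvStep n j) rows)[p]? =
      if ((p : Int) + 1) ∈ e ∧ ((p : Int) + 1) ≤ n then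
        rows[p]?.map (fun row => row.set j "0")
      else rows[p]? := by
  induction e generalizing rows with
  | nil => simp
  | cons m t ih =>
    simp only [List.foldl_cons, ih]
    by_cases hm : m = (p : Int) + 1
    · by_cases hq : m ≤ n
      · -- this member touches row p
        have hc : 1 ≤ m ∧ m ≤ n := ⟨by omega, hq⟩
        have hidx : (m - 1).toNat = p := by omega
        have hset : (pvStep n j rows m)[p]? = rows[p]?.map (fun row => row.set j "0") := by
          unfold pvStep
          rw [if_pos hc, hidx]
          by_cases hp : p < rows.length
          · simp [hp]
          · have h2 : rows[p]? = none := by simp; omega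
            rw [List.set_eq_of_length_le (by omega), h2]; rfl
        rw [hset]
        have hqn : ((p : Int) + 1) ≤ n := by omega
        have hmem : ((p : Int) + 1) ∈ m :: t := by rw [← hm]; exact List.mem_cons_self
        by_cases ht : ((p : Int) + 1) ∈ t
        · rw [if_pos ⟨ht, hqn⟩, if_pos ⟨hmem, hqn⟩, Option.map_map]
          cases rows[p]? <;> simp [List.set_set]
        · rw [if_neg (by simp [ht]), if_pos ⟨hmem, hqn⟩]
      · -- m = p+1 but m > n: no update, and the condition is false on both sides
        have hne : (pvStep n j rows m)[p]? = rows[p]? := by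
          unfold pvStep; rw [if_neg (by omega)]
        rw [hne]
        have hqn : ¬ ((p : Int) + 1) ≤ n := by omega
        rw [if_neg (by simp [hqn]), if_neg (by simp [hqn])]
    · -- a member of another row (or skipped): row p unchanged by this step
      have hne : (pvStep n j rows m)[p]? = rows[p]? := by
        unfold pvStep
        split_ifs with h
        · rw [List.getElem?_set_ne (by omega)]
        · rfl
      rw [hne]
      have : (((p : Int) + 1) ∈ m :: t ∧ ((p : Int) + 1) ≤ n) ↔
          (((p : Int) + 1) ∈ t ∧ ((p : Int) + 1) ≤ n) := by
        constructor
        · rintro ⟨hmem, hqn⟩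
          rcases List.mem_cons.mp hmem with h | h
          · exact absurd h.symm hm
          · exact ⟨h, hqn⟩
        · rintro ⟨hmem, hqn⟩; exact ⟨List.mem_cons_of_mem _ hmem, hqn⟩
      simp only [this]

-- effect of the whole enumerate loop on row p (L : the enumerate pairs)
theorem pvOuter_elem (n : Int) (L : List (Int × List Int)) (rows : List (List String)) (p : Nat) :
    (L.foldl (fun rows je => je.2.foldl (pvStep n je.1.toNat) rows) rows)[p]? =
      rows[p]?.map (fun row => L.foldl (fun row je =>
        if ((p : Int) + 1) ∈ je.2 ∧ ((p : Int) + 1) ≤ n then row.set je.1.toNat "0" else row) row) := by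
  induction L generalizing rows with
  | nil => simp
  | cons je t ih =>
    simp only [List.foldl_cons]
    rw [ih, pvInner_elem]
    by_cases hc : ((p : Int) + 1) ∈ je.2 ∧ ((p : Int) + 1) ≤ n
    · rw [if_pos hc]
      simp only [if_pos hc]
      rw [Option.map_map]
      rfl
    · rw [if_neg hc]
      simp only [if_neg hc]

-- the row loop on a concrete pre ++ replicate row computes the mapped row
theorem pvRow_fold (n q : Int) (S : List (List Int)) (k : Nat) (pre : List String)
    (hk : pre.length = k) :
    (PySem.List.enumerate S (k : Int)).foldl (fun row je =>
        if q ∈ je.2 ∧ q ≤ n then row.set je.1.toNat "0" else row)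
      (pre ++ List.replicate S.length "1") =
      pre ++ S.map (fun e => if q ∈ e ∧ q ≤ n then "0" else "1") := by
  induction S generalizing k pre with
  | nil => simp
  | cons e t ih =>
    rw [PySem.List.enumerate_cons, List.foldl_cons]
    have hstep : (if q ∈ e ∧ q ≤ n then
        (pre ++ List.replicate (e :: t).length "1").set (k : Int).toNat "0"
        else (pre ++ List.replicate (e :: t).length "1")) =
        pre ++ (if q ∈ e ∧ q ≤ n then "0" else "1") :: List.replicate t.length "1" := by
      by_cases hc : q ∈ e ∧ q ≤ n
      · simp only [hc, List.length_cons, List.replicate_succ]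
        have : (k : Int).toNat = pre.length := by omega
        rw [this]; simp
      · simp [hc, List.replicate_succ]
    rw [hstep]
    have hre : pre ++ (if q ∈ e ∧ q ≤ n then "0" else "1") :: List.replicate t.length "1" =
        (pre ++ [if q ∈ e ∧ q ≤ n then "0" else "1"]) ++ List.replicate t.length "1" := by simp
    have hcast : (k : Int) + 1 = ((k + 1 : Nat) : Int) := by push_cast; ring
    rw [hre, hcast, ih (k+1) _ (by simp [hk])]
    simp

-- B reduced to the normal form
-- the grid after all updates, row by row
theorem pvGrid_eq (MUS : List (List Int)) (n : Int) :
    ((PySem.List.enumerate MUS 0).foldl (fun rows je =>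
        je.2.foldl (pvStep n je.1.toNat) rows)
      ((PySem.List.pyRange 0 n 1).map (fun _ => PySem.List.pyRepeat ["1"] (MUS.length : Int)))) =
      (List.range n.toNat).map (fun p : Nat =>
        MUS.map (fun e => if ((p : Int) + 1) ∈ e ∧ ((p : Int) + 1) ≤ n then "0" else "1")) := by
  apply List.ext_getElem?
  intro p
  rw [pvOuter_elem]
  have hrep : PySem.List.pyRepeat ["1"] (MUS.length : Int) = List.replicate MUS.length "1" := by
    rw [PySem.List.pyRepeat_singleton]; simp
  have h0 : ((PySem.List.pyRange 0 n 1).map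
      (fun _ => PySem.List.pyRepeat ["1"] (MUS.length : Int)))[p]? =
      if p < n.toNat then some (List.replicate MUS.length "1") else none := by
    rw [PySem.List.pyRange_one, hrep]
    by_cases hp : p < n.toNat
    · have h1 : p < (n - 0).toNat := by omega
      simp [h1, hp]
    · have h1 : ¬ p < (n - 0).toNat := by omega
      simp [h1, hp]
  rw [h0]
  by_cases hp : p < n.toNat
  · rw [if_pos hp]
    have hfold := pvRow_fold n ((p : Int) + 1) MUS 0 [] rfl
    simp only [List.nil_append, Nat.cast_zero] at hfold
    simp only [Option.map_some, hfold]
    rw [List.getElem?_map, List.getElem?_range hp]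
    rfl
  · rw [if_neg hp]
    have : ¬ p < (List.range n.toNat).length := by simpa using hp
    rw [List.getElem?_map, List.getElem?_eq_none (by simpa using hp)]
    rfl

-- B reduced to the normal form
theorem pvB_eq (MUS : List (List Int)) (n : Int) :
    generateCArray_alt MUS n =
      PySem.List.pyRepeat [""] n ++
        (List.range n.toNat).map (fun p : Nat => pvRowStr MUS n ((p : Int) + 1)) := by
  show PySem.List.pyRepeat [""] n ++
      ((PySem.List.enumerate MUS 0).foldl (fun rows je =>
        je.2.foldl (fun rows m =>
          if 1 ≤ m ∧ m ≤ n then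
            PySem.List.pySetD rows (m-1) (PySem.List.pySetD (PySem.List.pyGetD rows (m-1) []) je.1 "0")
          else rows) rows)
        ((PySem.List.pyRange 0 n 1).map (fun _ => PySem.List.pyRepeat ["1"] (MUS.length : Int)))).map
        (fun r => PySem.Str.join "" r) = _
  have hstep : ∀ (rows : List (List String)), ∀ je ∈ PySem.List.enumerate MUS 0,
      (fun (rows : List (List String)) (je : Int × List Int) => je.2.foldl (fun rows m =>
        if 1 ≤ m ∧ m ≤ n then
          PySem.List.pySetD rows (m-1) (PySem.List.pySetD (PySem.List.pyGetD rows (m-1) []) je.1 "0")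
        else rows) rows) rows je =
      (fun (rows : List (List String)) (je : Int × List Int) =>
        je.2.foldl (pvStep n je.1.toNat) rows) rows je := by
    intro rows je hje
    have hj : 0 ≤ je.1 := by
      rcases (PySem.List.mem_enumerate_iff MUS 0 je).mp hje with ⟨k, hk, hje'⟩
      subst hje'; simp
    exact PySem.List.foldl_congr_mem je.2 _ _ rows (fun acc m _ => pvPort_step_eq n je.1 hj acc m)
  rw [PySem.List.foldl_congr_mem _ _ _ _ hstep, pvGrid_eq]
  congr 1
  rw [List.map_map]
  apply List.map_congr_left
  intro p _
  rfl

-- ===== VERDICT (by name: the statement is the Claim_ definition above) =====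
theorem generateCArray_spec : Claim_equal_generateCArray := by
  intro MUS n _
  unfold Spec_generateCArray
  rw [pvA_eq, pvB_eq]
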